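-- pv_equiv track=rewrite | github.com/tf-landingzone/aws-lz-accounts | scripts/resolve_account.py | infer_environment
-- ===== SOURCE A (Python) =====
-- def infer_environment(account_name: str) -> str:
--     """Infer environment from account name prefix."""
--     env_prefixes = {
--         "prod-": "production",
--         "production-": "production",
--         "staging-": "staging",
--         "stg-": "staging",
--         "dev-": "development",
--         "development-": "development",
--         "sandbox-": "sandbox",
--         "sbx-": "sandbox",
--     }
--     for prefix, env in env_prefixes.items():
--         if account_name.startswith(prefix):
--             return env
--     return "production"  # Secure default
-- ===== SOURCE B (Python) =====
-- _ENV = {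
--     "prod": "production",
--     "production": "production",
--     "staging": "staging",
--     "stg": "staging",
--     "dev": "development",
--     "development": "development",
--     "sandbox": "sandbox",
--     "sbx": "sandbox",
-- }
--
--
-- def infer_environment(account_name: str) -> str:
--     """Infer environment from account name prefix."""
--     if "-" in account_name:
--         return _ENV.get(account_name.split("-", 1)[0], "production")
--     return "production"
-- ===== Notes on version B (the rewrite author's own statement) =====
-- stated objective: idiomatic
-- what changed: Replaces the linear scan of eight startswith prefix tests with a single extraction of the first dash-delimited segment and one dict lookup with a default.
import Mathlib
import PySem

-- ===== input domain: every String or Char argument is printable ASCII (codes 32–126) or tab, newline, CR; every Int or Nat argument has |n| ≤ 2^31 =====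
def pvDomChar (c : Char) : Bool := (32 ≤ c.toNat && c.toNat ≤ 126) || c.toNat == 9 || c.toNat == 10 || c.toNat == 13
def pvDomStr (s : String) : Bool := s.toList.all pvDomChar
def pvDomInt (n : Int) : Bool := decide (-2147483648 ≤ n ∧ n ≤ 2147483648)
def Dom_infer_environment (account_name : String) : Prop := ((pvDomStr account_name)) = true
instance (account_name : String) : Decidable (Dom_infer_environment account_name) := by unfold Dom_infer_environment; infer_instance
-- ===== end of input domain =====

-- B replaces A's scan over eight startswith prefix tests by extracting the first
-- dash-delimited segment once and doing a single dict lookup with a default (idiomatic).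

-- ===== PORT A =====
-- A iterates its prefix dict in insertion order, returning on the first startswith match.
def infer_environment (account_name : String) : String :=
  if PySem.Str.startswith account_name "prod-" then "production"
  else if PySem.Str.startswith account_name "production-" then "production"
  else if PySem.Str.startswith account_name "staging-" then "staging"
  else if PySem.Str.startswith account_name "stg-" then "staging"
  else if PySem.Str.startswith account_name "dev-" then "development"
  else if PySem.Str.startswith account_name "development-" then "development"
  else if PySem.Str.startswith account_name "sandbox-" then "sandbox"
  else if PySem.Str.startswith account_name "sbx-" then "sandbox"
  else "production"

-- ===== PORT B =====
-- the dict literal _ENV of Source B (all keys distinct)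
def pvEnvMap : PySem.Dict String String :=
  ⟨[("prod", "production"), ("production", "production"),
    ("staging", "staging"), ("stg", "staging"),
    ("dev", "development"), ("development", "development"),
    ("sandbox", "sandbox"), ("sbx", "sandbox")]⟩

def infer_environment_alt (account_name : String) : String :=
  if PySem.Str.isIn "-" account_name then
    match PySem.Str.splitMax? account_name "-" 1 with
    | some (k :: _) => PySem.Dict.getD pvEnvMap k "production"
    | _ => "production"   -- unreachable: sep "-" is nonempty and split is nonempty
  else "production"

-- ===== PRECONDITION & SPEC =====
def Spec_infer_environment (account_name : String) (out : String) : Prop := out = infer_environment_alt account_name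
instance (account_name : String) (out : String) : Decidable (Spec_infer_environment account_name out) := by unfold Spec_infer_environment; infer_instance

-- ===== CLAIM (what is proved, stated in full; the proofs are below) =====
def Claim_equal_infer_environment : Prop := ∀ (account_name : String), Dom_infer_environment account_name → Spec_infer_environment account_name (infer_environment account_name)

-- ===== LEMMAS AND PROOFS =====

-- the m = 0 tail of the split loop: the rest of the string is the last piece
theorem pv_go_zero (fuel : Nat) (l cur : List Char) (acc : List (List Char)) :
    PySem.Chars.splitOnMax.go ['-'] fuel 0 l cur acc = acc.reverse ++ [cur.reverse ++ l] := by
  rw [PySem.Chars.splitOnMax.go.eq_def]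
  cases fuel with
  | zero => simp
  | succ f => cases l <;> simp

-- the maxsplit = 1 split loop: first piece = chars before the first '-', one more piece after it
theorem pv_go_one (l : List Char) (fuel : Nat) (cur : List Char) (acc : List (List Char))
    (h : l.length < fuel) :
    PySem.Chars.splitOnMax.go ['-'] fuel 1 l cur acc =
      if '-' ∈ l then
        acc.reverse ++ [cur.reverse ++ l.takeWhile (fun c => c != '-'),
                        (l.dropWhile (fun c => c != '-')).tail]
      else acc.reverse ++ [cur.reverse ++ l] := by
  induction l generalizing fuel cur acc with
  | nil =>
    rw [PySem.Chars.splitOnMax.go.eq_def]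
    cases fuel with
    | zero => omega
    | succ f => simp
  | cons c rest ih =>
    cases fuel with
    | zero => simp at h
    | succ f =>
      rw [PySem.Chars.splitOnMax.go.eq_def]
      by_cases hc : c = '-'
      · subst hc
        simp [List.isPrefixOf, pv_go_zero]
      · have hpre : List.isPrefixOf ['-'] (c :: rest) = false := by
          simp [List.isPrefixOf]; exact fun h' => (hc h'.symm).elim
        simp only [hpre, if_neg (by omega : ¬ (1 : Nat) = 0), Bool.false_eq_true, if_false]
        rw [ih f (c :: cur) acc (by simpa using Nat.lt_of_succ_lt_succ h)]
        have hne : (c != '-') = true := by simpa using hc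
        by_cases hm : '-' ∈ rest
        · simp [hm, hne]
        · simp [hm, hne]
          exact fun h => hc h.symm

-- startswith on a dash-terminated prefix = first dash-delimited segment equals the bare prefix
theorem pv_sw_iff (L p : List Char) (hp : '-' ∉ p) :
    ((p ++ ['-']) <+: L) ↔ ('-' ∈ L ∧ L.takeWhile (fun c => c != '-') = p) := by
  induction L generalizing p with
  | nil =>
    simp only [List.mem_nil_iff, false_and, iff_false]
    intro hpre
    have := hpre.length_le
    simp at this
  | cons c r ih =>
    by_cases hc : c = '-'
    · subst hc
      cases p with
      | nil => simp [List.prefix_cons_iff]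
      | cons q p' =>
        simp only [List.mem_cons, List.not_mem_nil] at hp
        constructor
        · intro hpre
          rw [List.cons_append, List.cons_prefix_cons] at hpre
          exact absurd hpre.1.symm (fun h => hp (Or.inl h))
        · rintro ⟨-, htk⟩
          simp [List.takeWhile_cons] at htk
    · have hne : (c != '-') = true := by simpa using hc
      cases p with
      | nil =>
        simp only [List.nil_append, List.takeWhile_cons, hne, if_true]
        constructor
        · intro hpre
          rw [List.cons_prefix_cons] at hpre
          exact absurd hpre.1.symm hc
        · rintro ⟨-, htk⟩
          simp at htk
      | cons q p' =>
        have hp' : '-' ∉ p' := fun h => hp (List.mem_cons_of_mem _ h)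
        rw [List.cons_append, List.cons_prefix_cons]
        constructor
        · rintro ⟨hq, hpre⟩
          have := (ih p' hp').mp hpre
          refine ⟨List.mem_cons_of_mem _ this.1, ?_⟩
          simp [hne, hq, this.2]
        · rintro ⟨hm, htk⟩
          simp [hne] at htk
          refine ⟨htk.1.symm, (ih p' hp').mpr ⟨?_, htk.2⟩⟩
          rcases List.mem_cons.mp hm with h | h
          · exact absurd h.symm hc
          · exact h

-- A's startswith tests, rephrased through the first segment (k is a literal like "prod")
theorem pv_sw_str (s : String) (k : String) (hk : '-' ∉ k.toList) :
    PySem.Str.startswith s (String.ofList (k.toList ++ ['-'])) = true ↔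
      ('-' ∈ s.toList ∧ s.toList.takeWhile (fun c => c != '-') = k.toList) := by
  rw [show PySem.Str.startswith s (String.ofList (k.toList ++ ['-'])) =
        PySem.Chars.startswith s.toList (k.toList ++ ['-']) by
      simp [PySem.Str.startswith_eq]]
  rw [PySem.Chars.startswith_iff]
  exact pv_sw_iff s.toList k.toList hk

-- B on a string containing a dash: a lookup of the first segment
theorem pv_alt_char (s : String) (hd : '-' ∈ s.toList) :
    infer_environment_alt s =
      PySem.Dict.getD pvEnvMap (String.ofList (s.toList.takeWhile (fun c => c != '-'))) "production" := by
  have hin : PySem.Str.isIn "-" s = true := by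
    rw [PySem.Str.isIn_iff_infix]
    simpa using (List.singleton_infix_iff '-' s.toList).mpr hd
  unfold infer_environment_alt
  rw [hin, if_pos rfl]
  have hsplit : PySem.Str.splitMax? s "-" 1 =
      some [String.ofList (s.toList.takeWhile (fun c => c != '-')),
            String.ofList ((s.toList.dropWhile (fun c => c != '-')).tail)] := by
    simp only [PySem.Str.splitMax?, PySem.Chars.splitMax?]
    rw [show ("-" : String).toList = ['-'] from rfl]
    simp only [List.isEmpty_cons, Bool.false_eq_true, if_false, PySem.Chars.splitOnMax]
    rw [if_neg (by omega)]
    rw [show ((1 : Int)).toNat = 1 from rfl]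
    rw [pv_go_one s.toList (s.toList.length + 1) [] [] (Nat.lt_succ_self _)]
    simp [hd]
  rw [hsplit]

-- evaluate the assoc-list lookup keyed by an ofList against a literal string key
theorem pv_beq_ofList (a : String) (l : List Char) :
    (a == String.ofList l) = decide (l = a.toList) := by
  by_cases h : l = a.toList
  · subst h; simp
  · have : a ≠ String.ofList l := by
      intro he
      exact h (by rw [he, String.toList_ofList])
    simp [this, h]

-- ===== VERDICT (by name: the statement is the Claim_ definition above) =====
theorem infer_environment_spec : Claim_equal_infer_environment := by
  intro s _
  unfold Spec_infer_environment
  by_cases hd : '-' ∈ s.toList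
  · -- rewrite each of A's tests through pv_sw_str, B through pv_alt_char and pv_beq_ofList
    rw [pv_alt_char s hd]
    have hb : ∀ (key : String), '-' ∉ key.toList →
        ((PySem.Str.startswith s (String.ofList (key.toList ++ ['-'])) = true) ↔
          s.toList.takeWhile (fun c => c != '-') = key.toList) := by
      intro key hkey
      rw [pv_sw_str s key hkey]
      exact ⟨And.right, fun h => ⟨hd, h⟩⟩
    have b1 : (PySem.Str.startswith s "prod-" = true) ↔
        s.toList.takeWhile (fun c => c != '-') = "prod".toList := hb "prod" (by decide)
    have b2 : (PySem.Str.startswith s "production-" = true) ↔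
        s.toList.takeWhile (fun c => c != '-') = "production".toList := hb "production" (by decide)
    have b3 : (PySem.Str.startswith s "staging-" = true) ↔
        s.toList.takeWhile (fun c => c != '-') = "staging".toList := hb "staging" (by decide)
    have b4 : (PySem.Str.startswith s "stg-" = true) ↔
        s.toList.takeWhile (fun c => c != '-') = "stg".toList := hb "stg" (by decide)
    have b5 : (PySem.Str.startswith s "dev-" = true) ↔
        s.toList.takeWhile (fun c => c != '-') = "dev".toList := hb "dev" (by decide)
    have b6 : (PySem.Str.startswith s "development-" = true) ↔
        s.toList.takeWhile (fun c => c != '-') = "development".toList := hb "development" (by decide)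
    have b7 : (PySem.Str.startswith s "sandbox-" = true) ↔
        s.toList.takeWhile (fun c => c != '-') = "sandbox".toList := hb "sandbox" (by decide)
    have b8 : (PySem.Str.startswith s "sbx-" = true) ↔
        s.toList.takeWhile (fun c => c != '-') = "sbx".toList := hb "sbx" (by decide)
    unfold infer_environment
    simp only [pvEnvMap, PySem.Dict.getD, PySem.Dict.get?, PySem.Dict.items, List.find?,
      pv_beq_ofList, b1, b2, b3, b4, b5, b6, b7, b8]
    split_ifs <;> simp_all
  · -- no dash: every startswith test of A is false and B takes its default branch
    have hb0 : ∀ (key : String), '-' ∉ key.toList →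
        PySem.Str.startswith s (String.ofList (key.toList ++ ['-'])) = false := by
      intro key hkey
      rw [Bool.eq_false_iff]
      intro hT
      exact hd ((pv_sw_str s key hkey).mp hT).1
    have hin : PySem.Str.isIn "-" s = false := by
      rw [Bool.eq_false_iff]
      intro hT
      rw [PySem.Str.isIn_iff_infix] at hT
      exact hd ((List.singleton_infix_iff '-' s.toList).mp (by simpa using hT))
    unfold infer_environment infer_environment_alt
    rw [hin]
    have c1 : PySem.Str.startswith s "prod-" = false := hb0 "prod" (by decide)
    have c2 : PySem.Str.startswith s "production-" = false := hb0 "production" (by decide)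
    have c3 : PySem.Str.startswith s "staging-" = false := hb0 "staging" (by decide)
    have c4 : PySem.Str.startswith s "stg-" = false := hb0 "stg" (by decide)
    have c5 : PySem.Str.startswith s "dev-" = false := hb0 "dev" (by decide)
    have c6 : PySem.Str.startswith s "development-" = false := hb0 "development" (by decide)
    have c7 : PySem.Str.startswith s "sandbox-" = false := hb0 "sandbox" (by decide)
    have c8 : PySem.Str.startswith s "sbx-" = false := hb0 "sbx" (by decide)
    simp at c1 c2 c3 c4 c5 c6 c7 c8
    simp [c1, c2, c3, c4, c5, c6, c7, c8]
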